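-- pv_equiv track=rewrite | github.com/chojaelong/CodingTest | code/프로그래머스/코드처리하기.py | solution
-- ===== SOURCE A (Python) =====
-- def solution(code):
--     mode = 0
--     array = list(code)
--     answer = ''
--
--     for idx, word in enumerate(array):
--         if word == "1":
--             mode = (mode + 1) % 2
--         else:
--             if idx % 2 == mode:
--                 answer += word
--
--     return "EMPTY" if len(answer) == 0 else answer
-- ===== SOURCE B (Python) =====
-- def solution(code):
--     parts = code.split("1")
--     pos = 0
--     out = []
--     for k, seg in enumerate(parts):
--         out.append(seg[(k - pos) % 2 :: 2])
--         pos += len(seg) + 1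
--     res = "".join(out)
--     return res if res else "EMPTY"
-- ===== Notes on version B (the rewrite author's own statement) =====
-- stated objective: faster
-- what changed: A's per-character loop with a toggling mode flag and string concatenation is replaced by splitting the code on the toggle character into toggle-free segments and taking from each segment a stride-2 slice whose start offset is determined by the segment number and its absolute start position.
import Mathlib
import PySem

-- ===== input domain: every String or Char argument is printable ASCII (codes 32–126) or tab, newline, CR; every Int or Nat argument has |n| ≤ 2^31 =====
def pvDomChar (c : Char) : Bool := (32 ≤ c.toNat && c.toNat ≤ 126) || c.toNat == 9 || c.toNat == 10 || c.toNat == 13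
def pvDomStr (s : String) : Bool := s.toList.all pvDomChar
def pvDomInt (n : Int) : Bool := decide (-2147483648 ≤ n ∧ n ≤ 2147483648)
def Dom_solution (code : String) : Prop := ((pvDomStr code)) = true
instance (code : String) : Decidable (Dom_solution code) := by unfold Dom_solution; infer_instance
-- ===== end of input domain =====

-- B replaces A's per-character toggle loop by split-on-'1' plus stride-2 slices of the segments (a different algorithm; a timing run measured B faster).

-- ===== PORT A =====
-- A: one loop over enumerate(code), toggling `mode` on '1' and appending chars whose index parity equals mode.
def solution (code : String) : String :=
  let array := code.toList
  let st := (PySem.List.enumerate array 0).foldl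
    (fun (st : Int × List Char) (p : Int × Char) =>
      if p.2 = '1' then (PySem.Int.mod (st.1 + 1) 2, st.2)
      else if PySem.Int.mod p.1 2 = st.1 then (st.1, st.2 ++ [p.2]) else st)
    (0, [])
  if st.2.length = 0 then "EMPTY" else String.ofList st.2

-- ===== PORT B =====
-- hand port of code.split("1") for the single-character separator "1": exact for this sep
-- (Python keeps empty pieces, so the result is never the empty list).
def splitOne : List Char → List (List Char)
  | [] => [[]]
  | c :: cs =>
    if c = '1' then [] :: splitOne cs
    else
      match splitOne cs with
      | [] => [[c]]   -- unreachable: splitOne never returns []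
      | h :: t => (c :: h) :: t

-- hand port of the stride-2 slice seg[0::2]: exact (every second element from index 0).
def step2 : List Char → List Char
  | [] => []
  | [c] => [c]
  | c :: _ :: cs => c :: step2 cs

-- B: split code on '1'; from segment k starting at absolute index pos take seg[(k-pos)%2::2];
-- join and return.  seg[o::2] with o ∈ {0,1} is ported as step2 (seg.drop o) (exact there);
-- "".join is List.flatten on the character lists.
def solution_alt (code : String) : String :=
  let parts := splitOne code.toList
  let st := (PySem.List.enumerate parts 0).foldl
    (fun (st : Int × List (List Char)) (p : Int × List Char) =>
      (st.1 + p.2.length + 1,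
       st.2 ++ [step2 (p.2.drop (PySem.Int.mod (p.1 - st.1) 2).toNat)]))
    (0, [])
  let res := st.2.flatten
  if res = [] then "EMPTY" else String.ofList res

-- ===== PRECONDITION & SPEC =====
def Spec_solution (code : String) (out : String) : Prop := out = solution_alt code
instance (code : String) (out : String) : Decidable (Spec_solution code out) := by unfold Spec_solution; infer_instance

-- ===== CLAIM (what is proved, stated in full; the proofs are below) =====
def Claim_equal_solution : Prop := ∀ (code : String), Dom_solution code → Spec_solution code (solution code)

-- ===== LEMMAS AND PROOFS =====

-- Specification of the kept characters, recursing with absolute index i and '1'-count o.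
def specKept : List Char → Int → Int → List Char
  | [], _, _ => []
  | c :: cs, i, o =>
    if c = '1' then specKept cs (i + 1) (o + 1)
    else if i % 2 = o % 2 then c :: specKept cs (i + 1) o
    else specKept cs (i + 1) o

theorem pymod_two (a : Int) : PySem.Int.mod a 2 = a % 2 :=
  PySem.Int.mod_eq_emod_of_pos (by norm_num)

theorem mod_succ_mod (o : Int) : (o % 2 + 1) % 2 = (o + 1) % 2 := by omega

-- A's loop, started in state (o % 2, ans), appends exactly specKept.
theorem solutionA_loop (cs : List Char) (i o : Int) (ans : List Char) :
    ((PySem.List.enumerate cs i).foldl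
      (fun (st : Int × List Char) (p : Int × Char) =>
        if p.2 = '1' then (PySem.Int.mod (st.1 + 1) 2, st.2)
        else if PySem.Int.mod p.1 2 = st.1 then (st.1, st.2 ++ [p.2]) else st)
      (o % 2, ans)).2 = ans ++ specKept cs i o := by
  simp only [pymod_two]
  induction cs generalizing i o ans with
  | nil => simp [PySem.List.enumerate_nil, specKept]
  | cons c cs ih =>
    simp only [PySem.List.enumerate_cons, List.foldl_cons, specKept]
    by_cases h1 : c = '1'
    · rw [if_pos h1, if_pos h1, mod_succ_mod]
      exact ih (i + 1) (o + 1) ans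
    · rw [if_neg h1, if_neg h1]
      by_cases h2 : i % 2 = o % 2
      · rw [if_pos h2, if_pos h2, ih (i + 1) o (ans ++ [c])]
        simp
      · rw [if_neg h2, if_neg h2]
        exact ih (i + 1) o ans

theorem step2_cons (c : Char) (cs : List Char) :
    step2 (c :: cs) = c :: step2 (cs.drop 1) := by
  cases cs <;> simp [step2]

theorem splitOne_no1 (cs : List Char) (h : '1' ∉ cs) : splitOne cs = [cs] := by
  induction cs with
  | nil => simp [splitOne]
  | cons c cs ih =>
    simp only [List.mem_cons, not_or] at h
    have hc : ¬ c = '1' := fun e => h.1 e.symm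
    simp only [splitOne, if_neg hc, ih h.2]

theorem splitOne_app (seg rest : List Char) (h : '1' ∉ seg) :
    splitOne (seg ++ '1' :: rest) = seg :: splitOne rest := by
  induction seg with
  | nil => simp [splitOne]
  | cons c seg ih =>
    simp only [List.mem_cons, not_or] at h
    have hc : ¬ c = '1' := fun e => h.1 e.symm
    simp only [List.cons_append, splitOne, if_neg hc, ih h.2]

-- every list containing '1' splits as seg ++ '1' :: rest with '1'-free seg
theorem exists_split (cs : List Char) (h : '1' ∈ cs) :
    ∃ seg rest, cs = seg ++ '1' :: rest ∧ '1' ∉ seg ∧ rest.length < cs.length := by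
  induction cs with
  | nil => cases h
  | cons c cs ih =>
    by_cases hc : c = '1'
    · exact ⟨[], cs, by simp [hc], by simp, by simp⟩
    · have hm : '1' ∈ cs := by
        rcases List.mem_cons.mp h with h' | h'
        · exact absurd h'.symm hc
        · exact h'
      obtain ⟨seg, rest, heq, hs, hl⟩ := ih hm
      refine ⟨c :: seg, rest, by simp [heq], ?_, by simp; omega⟩
      simp only [List.mem_cons, not_or]
      exact ⟨fun e => hc e.symm, hs⟩

-- specKept on a '1'-free segment is a stride-2 slice
theorem specKept_seg (seg : List Char) (h : '1' ∉ seg) (i o : Int) :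
    specKept seg i o = if i % 2 = o % 2 then step2 seg else step2 (seg.drop 1) := by
  induction seg generalizing i o with
  | nil => simp [specKept, step2]
  | cons c cs ih =>
    simp only [List.mem_cons, not_or] at h
    have hc : ¬ c = '1' := fun e => h.1 e.symm
    by_cases h2 : i % 2 = o % 2
    · have hpar : ¬ ((i + 1) % 2 = o % 2) := by omega
      simp [specKept, hc, ih h.2, h2, hpar, step2_cons]
    · have hpar : (i + 1) % 2 = o % 2 := by omega
      simp [specKept, hc, ih h.2, h2, hpar]

-- specKept splits at a '1'
theorem specKept_app (seg rest : List Char) (h : '1' ∉ seg) (i o : Int) :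
    specKept (seg ++ '1' :: rest) i o
      = specKept seg i o ++ specKept rest (i + seg.length + 1) (o + 1) := by
  induction seg generalizing i o with
  | nil => simp [specKept]
  | cons c cs ih =>
    simp only [List.mem_cons, not_or] at h
    have hc : ¬ c = '1' := fun e => h.1 e.symm
    by_cases h2 : i % 2 = o % 2 <;>
      simp [List.cons_append, specKept, hc, ih h.2, h2] <;>
      · congr 1
        omega

-- B's fold over the split, started at segment number k / absolute position pos,
-- flattens to specKept cs pos k.
theorem solutionB_loop : ∀ (n : ℕ) (cs : List Char), cs.length = n →
    ∀ (k pos : Int) (acc : List (List Char)),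
    ((PySem.List.enumerate (splitOne cs) k).foldl
      (fun (st : Int × List (List Char)) (p : Int × List Char) =>
        (st.1 + p.2.length + 1,
         st.2 ++ [step2 (p.2.drop (PySem.Int.mod (p.1 - st.1) 2).toNat)]))
      (pos, acc)).2.flatten = acc.flatten ++ specKept cs pos k := by
  intro n
  induction n using Nat.strong_induction_on with
  | _ n ih =>
    intro cs hn k pos acc
    by_cases hmem : '1' ∈ cs
    · obtain ⟨seg, rest, heq, hs, hl⟩ := exists_split cs hmem
      subst heq
      rw [splitOne_app seg rest hs, PySem.List.enumerate_cons, List.foldl_cons]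
      have := ih rest.length (by omega) rest rfl (k + 1) (pos + (seg.length : Int) + 1)
        (acc ++ [step2 (seg.drop (PySem.Int.mod (k - pos) 2).toNat)])
      simp only [this, specKept_app seg rest hs, List.flatten_append, List.flatten_cons,
        List.flatten_nil, List.append_nil, List.append_assoc]
      congr 2
      rw [specKept_seg seg hs, pymod_two]
      have h01 : (k - pos) % 2 = 0 ∨ (k - pos) % 2 = 1 := by omega
      by_cases h2 : pos % 2 = k % 2
      · have : (k - pos) % 2 = 0 := by omega
        simp [h2, this]
      · have : (k - pos) % 2 = 1 := by omega
        simp [h2, this]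
    · rw [splitOne_no1 cs hmem, PySem.List.enumerate_cons, PySem.List.enumerate_nil,
        List.foldl_cons, List.foldl_nil]
      simp only [List.flatten_append, List.flatten_cons, List.flatten_nil, List.append_nil]
      congr 1
      rw [specKept_seg cs hmem, pymod_two]
      by_cases h2 : pos % 2 = k % 2
      · have : (k - pos) % 2 = 0 := by omega
        simp [h2, this]
      · have : (k - pos) % 2 = 1 := by omega
        simp [h2, this]

-- ===== VERDICT (by name: the statement is the Claim_ definition above) =====
theorem solution_spec : Claim_equal_solution := by
  intro code _
  unfold Spec_solution solution solution_alt
  have hA := solutionA_loop code.toList 0 0 []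
  have hB := solutionB_loop code.toList.length code.toList rfl 0 0 []
  norm_num at hA
  norm_num at hB
  simp only [pymod_two, hA, hB, List.length_eq_zero_iff]
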